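-- pv_equiv track=rewrite | github.com/versenyi98/advent-of-code-solutions | solutions/2024/Day 19 - Linen Layout/main.py | solution
-- ===== SOURCE A (Python) =====
-- from collections import defaultdict
--
-- def find_all_indices_of_substring(string, substring):
--   indices = []
--   start = 0
--   while True:
--     start = string.find(substring, start)
--     if start == -1:
--       break
--     indices.append(start)
--     start += 1
--   return indices
--
-- def dfs(graph, node, goals, visited, path):
--   queue = [(node, path)]
--   results = []
--
--   while queue:
--     node, path = queue.pop(0)
--
--     if node in goals:
--       return [(node, path)]
--
--     visited.append(node)
--
--     for neighbor in graph[node]: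
--       if neighbor in visited:
--         continue
--       visited.append(neighbor)
--       queue.append((neighbor, path + [neighbor]))
--   return []
--
-- def get_number_of_all_paths(graph, index, pattern, visited):
--   if index in visited:
--     return visited[index]
--   if index == len(pattern):
--     return 1
--   if index > len(pattern):
--     return 0
--   visited[index] = sum(get_number_of_all_paths(graph, neighbor, pattern, visited) for neighbor in graph[index])
--   return visited[index]
--
-- def get_graph(pattern, towels):
--   graph = defaultdict(list)
--   for towel in towels:
--     indices = find_all_indices_of_substring(pattern, towel)
--     for index in indices:
--       graph[index].append(index + len(towel))
--   return graph
--
-- def solution(towels, patterns):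
--   task1 = 0
--   task2 = 0
--   for pattern in patterns:
--     graph = get_graph(pattern, towels)
--     task1 += len(dfs(graph, 0, [len(pattern)], [], [0]))
--     task2 += get_number_of_all_paths(graph, 0, pattern, {})
--   return task1, task2
-- ===== SOURCE B (Python) =====
-- def solution(towels, patterns):
--   task1 = 0
--   task2 = 0
--   for pattern in patterns:
--     n = len(pattern)
--     dp = [0] * (n + 1)
--     dp[n] = 1
--     for i in range(n - 1, -1, -1):
--       dp[i] = sum(dp[i + len(t)] for t in towels if pattern[i:i + len(t)] == t)
--     task2 += dp[0]
--     task1 += 1 if dp[0] > 0 else 0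
--   return task1, task2
-- ===== Notes on version B (the rewrite author's own statement) =====
-- stated objective: simpler
-- what changed: B drops A's occurrence-graph construction, BFS reachability search and memoized recursion, and instead fills one backward DP array per pattern (dp[i] = number of tilings of pattern[i:]), reading both answers off dp[0].
import Mathlib
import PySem

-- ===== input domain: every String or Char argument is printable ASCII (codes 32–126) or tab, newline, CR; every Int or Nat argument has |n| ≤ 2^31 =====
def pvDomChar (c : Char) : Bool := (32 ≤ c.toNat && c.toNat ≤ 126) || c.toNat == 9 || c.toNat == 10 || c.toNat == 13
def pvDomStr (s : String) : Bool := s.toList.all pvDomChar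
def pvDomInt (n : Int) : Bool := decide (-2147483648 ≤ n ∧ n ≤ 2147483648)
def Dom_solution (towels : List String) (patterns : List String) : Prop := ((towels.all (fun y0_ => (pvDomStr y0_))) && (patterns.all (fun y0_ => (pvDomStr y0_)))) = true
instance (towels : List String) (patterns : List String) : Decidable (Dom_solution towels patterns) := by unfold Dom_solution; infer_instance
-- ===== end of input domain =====

-- B replaces A's occurrence graph + BFS + memoized recursion by a single backward DP array per
-- pattern (simpler); equivalence is about return values (A also mutates nothing observable).

-- ===== PORT A =====

-- find_all_indices_of_substring: the while-loop, fuel = |s|+2 (each iteration moves `start`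
-- strictly up and start never exceeds |s|, so the fuel is never exhausted; proved below).
def findAllLoop (s sub : List Char) : Nat → Int → List Int → List Int
  | 0, _, indices => indices
  | fuel+1, start, indices =>
    let start' := PySem.Chars.findFrom s sub start none
    if start' = -1 then indices
    else findAllLoop s sub fuel (start' + 1) (indices ++ [start'])

def findAllIndices (s sub : List Char) : List Int := findAllLoop s sub (s.length + 2) 0 []

-- get_graph
def getGraph (p : List Char) (towels : List String) : PySem.Dict Int (List Int) :=
  towels.foldl (fun g t =>
    (findAllIndices p t.toList).foldl
      (fun g idx => g.modify idx [] (· ++ [idx + (t.toList.length : Int)])) g)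
    PySem.Dict.empty

-- dfs: the while-loop over the queue, fuel = |pattern|+3 (every iteration pops one entry and each
-- enqueue marks a fresh node of 0..|pattern| visited, so the fuel is never exhausted; proved below).
def dfsLoop (g : PySem.Dict Int (List Int)) (goals : List Int) :
    Nat → List (Int × List Int) → List Int → List (Int × List Int)
  | 0, _, _ => []
  | fuel+1, queue, visited =>
    match queue with
    | [] => []
    | (node, path) :: rest =>
      if node ∈ goals then [(node, path)]
      else
        let st := (g.getD node []).foldl
          (fun (st : List (Int × List Int) × List Int) neighbor =>
            if neighbor ∈ st.2 then st
            else (st.1 ++ [(neighbor, path ++ [neighbor])], st.2 ++ [neighbor]))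
          (rest, visited ++ [node])
        dfsLoop g goals fuel st.1 st.2

-- get_number_of_all_paths: recursion with fuel = |pattern|+1 (each recursive call moves `index`
-- up by a towel's length ≥ 1 under Pre_, so the fuel is never exhausted; proved below).
def gnap (g : PySem.Dict Int (List Int)) (plen : Nat) :
    Nat → Int → PySem.Dict Int Int → Int × PySem.Dict Int Int
  | 0, _, visited => (0, visited)
  | fuel+1, index, visited =>
    match visited.get? index with
    | some v => (v, visited)
    | none =>
      if index = (plen : Int) then (1, visited)
      else if (plen : Int) < index then (0, visited)
      else
        let r := (g.getD index []).foldl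
          (fun (st : Int × PySem.Dict Int Int) neighbor =>
            let res := gnap g plen fuel neighbor st.2
            (st.1 + res.1, res.2))
          (0, visited)
        (r.1, r.2.insert index r.1)

def solution (towels : List String) (patterns : List String) : Int × Int :=
  patterns.foldl
    (fun (acc : Int × Int) pattern =>
      let p := pattern.toList
      let graph := getGraph p towels
      let r1 := (dfsLoop graph [(p.length : Int)] (p.length + 3) [((0 : Int), [(0 : Int)])] []).length
      let r2 := (gnap graph p.length (p.length + 1) 0 PySem.Dict.empty).1
      (acc.1 + (r1 : Int), acc.2 + r2))
    (0, 0)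

-- ===== PORT B =====
def solution_alt (towels : List String) (patterns : List String) : Int × Int :=
  patterns.foldl
    (fun (acc : Int × Int) pattern =>
      let p := pattern.toList
      let n := p.length
      let dp0 := PySem.List.pySetD (List.replicate (n + 1) (0 : Int)) (n : Int) 1
      let dp := (PySem.List.pyRange ((n : Int) - 1) (-1) (-1)).foldl
        (fun dp i =>
          PySem.List.pySetD dp i
            (((towels.filter (fun t =>
                PySem.List.slice p (some i) (some (i + (t.toList.length : Int))) == t.toList)).map
              (fun t => PySem.List.pyGetD dp (i + (t.toList.length : Int)) 0)).sum))
        dp0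
      let d0 := PySem.List.pyGetD dp (0 : Int) 0
      (acc.1 + (if 0 < d0 then 1 else 0), acc.2 + d0))
    (0, 0)

-- ===== PRECONDITION & SPEC =====
-- Pre_ excludes exactly the inputs where towels contains the empty string together with some
-- nonempty pattern: there A's memoized recursion follows the 0-length self-loop edge forever and
-- raises RecursionError (it never returns).
def Pre_solution (towels : List String) (patterns : List String) : Prop :=
  ¬ ("" ∈ towels ∧ ∃ p ∈ patterns, p ≠ "")
instance (towels : List String) (patterns : List String) : Decidable (Pre_solution towels patterns) := by
  unfold Pre_solution; infer_instance

def pvWitness_solution : List String × List String :=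
  (["r", "wr", "b", "g", "bwu", "rb", "gb", "br"], ["brwrr", "bggr", "ubwu"])

def Spec_solution (towels : List String) (patterns : List String) (out : Int × Int) : Prop := out = solution_alt towels patterns
instance (towels : List String) (patterns : List String) (out : Int × Int) : Decidable (Spec_solution towels patterns out) := by unfold Spec_solution; infer_instance

-- ===== CLAIM (what is proved, stated in full; the proofs are below) =====
def Claim_equal_solution : Prop := ∀ (towels : List String) (patterns : List String), Dom_solution towels patterns → Pre_solution towels patterns → Spec_solution towels patterns (solution towels patterns)

-- ===== LEMMAS AND PROOFS =====

-- The common mathematical description of both programs: W towels p f i is the number of ways to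
-- tile the suffix p[i:] by towels (computed with fuel f; any f > |p| - i gives the true count).
def W (towels : List String) (p : List Char) : Nat → Nat → Int
  | 0, _ => 0
  | fuel+1, i =>
    if i = p.length then 1
    else (towels.map (fun t =>
      if t.toList <+: p.drop i then W towels p fuel (i + t.toList.length) else 0)).sum

def natNbrs (p : List Char) (towels : List String) (c : Nat) : List Nat :=
  towels.flatMap (fun t => if t.toList <+: p.drop c then [c + t.toList.length] else [])

-- Reachability of the goal |p| from index i along towel edges.
inductive Reach (towels : List String) (p : List Char) : Nat → Prop
  | done : Reach towels p p.length
  | step {i : Nat} {t : String} (ht : t ∈ towels) (hp : t.toList <+: p.drop i)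
      (h : Reach towels p (i + t.toList.length)) : Reach towels p i

def NoEmpty (towels : List String) : Prop := ∀ t ∈ towels, t.toList ≠ []

theorem W_nonneg (towels : List String) (p : List Char) (f i : Nat) : 0 ≤ W towels p f i := by
  induction f generalizing i with
  | zero => exact le_refl 0
  | succ f ih =>
    unfold W
    split
    · exact zero_le_one
    · refine List.sum_nonneg ?_
      intro x hx
      obtain ⟨t, _, rfl⟩ := List.mem_map.1 hx
      split
      · exact ih _
      · exact le_refl 0

theorem towel_len_pos {towels : List String} (hT : NoEmpty towels) {t : String} (ht : t ∈ towels) :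
    1 ≤ t.toList.length := by
  have := hT t ht
  cases h : t.toList with
  | nil => exact absurd h this
  | cons a l => simp only [List.length_cons]; omega

theorem prefix_drop_le {p : List Char} {t : String} {i : Nat} (hp : t.toList <+: p.drop i)
    (hi : i ≤ p.length) : i + t.toList.length ≤ p.length := by
  have := hp.length_le
  rw [List.length_drop] at this
  omega

theorem W_stab (towels : List String) (p : List Char) (hT : NoEmpty towels) :
    ∀ f1 f2 i, i ≤ p.length → p.length - i < f1 → p.length - i < f2 →
      W towels p f1 i = W towels p f2 i := by
  intro f1
  induction f1 with
  | zero => intro f2 i _ h1 _; omega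
  | succ f1 ih =>
    intro f2 i hi h1 h2
    cases f2 with
    | zero => omega
    | succ f2 =>
      unfold W
      split
      · rfl
      · rename_i hne
        refine congrArg List.sum (List.map_congr_left ?_)
        intro t ht
        split
        · rename_i hp
          have hlen := towel_len_pos hT ht
          have hle := prefix_drop_le hp hi
          rw [ih f2 (i + t.toList.length) hle (by omega) (by omega)]
        · rfl

theorem sum_map_pos_iff {α : Type} (l : List α) (f : α → Int) (h : ∀ x ∈ l, 0 ≤ f x) :
    0 < (l.map f).sum ↔ ∃ x ∈ l, 0 < f x := by
  induction l with
  | nil => simp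
  | cons a l ih =>
    have ha : 0 ≤ f a := h a (by simp)
    have hrest : 0 ≤ (l.map f).sum :=
      List.sum_nonneg (by intro x hx; obtain ⟨y, hy, rfl⟩ := List.mem_map.1 hx; exact h y (by simp [hy]))
    have ihl := ih (fun x hx => h x (by simp [hx]))
    simp only [List.map_cons, List.sum_cons, List.mem_cons]
    constructor
    · intro hpos
      by_cases hfa : 0 < f a
      · exact ⟨a, Or.inl rfl, hfa⟩
      · have : 0 < (l.map f).sum := by omega
        obtain ⟨x, hx, hfx⟩ := ihl.1 this
        exact ⟨x, Or.inr hx, hfx⟩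
    · rintro ⟨x, hx | hx, hfx⟩
      · subst hx; omega
      · have : 0 < (l.map f).sum := ihl.2 ⟨x, hx, hfx⟩
        omega

theorem W_pos_iff (towels : List String) (p : List Char) (hT : NoEmpty towels) :
    ∀ f i, i ≤ p.length → p.length - i < f →
      (0 < W towels p f i ↔ Reach towels p i) := by
  intro f
  induction f with
  | zero => intro i _ h; omega
  | succ f ih =>
    intro i hi hf
    unfold W
    split
    · rename_i hieq
      subst hieq
      exact ⟨fun _ => Reach.done, fun _ => one_pos⟩
    · rename_i hne
      rw [sum_map_pos_iff]
      · constructor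
        · rintro ⟨t, ht, hpos⟩
          by_cases hp : t.toList <+: p.drop i
          · simp only [if_pos hp] at hpos
            have hlen := towel_len_pos hT ht
            have hle := prefix_drop_le hp hi
            exact Reach.step ht hp ((ih (i + t.toList.length) hle (by omega)).1 hpos)
          · simp [if_neg hp] at hpos
        · intro hr
          cases hr with
          | done => exact absurd rfl hne
          | step ht hp h =>
            rename_i t
            refine ⟨t, ht, ?_⟩
            rw [if_pos hp]
            have hlen := towel_len_pos hT ht
            have hle := prefix_drop_le hp hi
            exact (ih _ hle (by omega)).2 h
      · intro x hx
        split
        · exact W_nonneg _ _ _ _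
        · exact le_refl 0

-- occurrences of sub in s at position ≥ k
def occList (s sub : List Char) (k : Nat) : List Nat :=
  (List.range' k (s.length - k)).filter (fun j => decide (sub <+: s.drop j))

theorem no_occ_of_not_infix {s sub : List Char} {k j : Nat} (hk : k ≤ j)
    (hni : ¬ sub <:+: s.drop k) (hp : sub <+: s.drop j) : False := by
  refine hni ?_
  have hdj : (s.drop k).drop (j - k) = s.drop j := by
    rw [List.drop_drop]; congr 1; omega
  exact (hp.isInfix.trans (by rw [← hdj]; exact (List.drop_suffix (j - k) (s.drop k)).isInfix))

theorem findAllLoop_eq (s sub : List Char) (hs : sub ≠ []) :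
    ∀ fuel (k : Nat) acc, k ≤ s.length → s.length - k < fuel →
      findAllLoop s sub fuel (k : Int) acc = acc ++ (occList s sub k).map (Nat.cast) := by
  intro fuel
  induction fuel with
  | zero => intro k acc _ h; omega
  | succ fuel ih =>
    intro k acc hk hfuel
    unfold findAllLoop
    by_cases h1 : PySem.Chars.findFrom s sub (k : Int) none = -1
    · rw [if_pos h1]
      have hni : ¬ sub <:+: s.drop k := (PySem.Chars.findFrom_natCast_eq_neg_one_iff s sub k hk).1 h1
      have : occList s sub k = [] := by
        refine List.filter_eq_nil_iff.2 ?_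
        intro j hj hjp
        rw [decide_eq_true_eq] at hjp
        have hj' := List.mem_range'_1.1 hj
        exact no_occ_of_not_infix hj'.1 hni hjp
      rw [this]; simp
    · rw [if_neg h1]
      obtain ⟨hkle, hpre, hmin⟩ := PySem.Chars.findFrom_natCast_spec s sub k hk h1
      set r' := PySem.Chars.findFrom s sub (k : Int) none with hr'
      have hr0 : 0 ≤ r' := le_trans (by exact_mod_cast Int.natCast_nonneg k) hkle
      have hrcast : r' = ((r'.toNat : Nat) : Int) := by omega
      have hkr : k ≤ r'.toNat := by omega
      have hsublen : 1 ≤ sub.length := by cases sub with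
        | nil => exact absurd rfl hs
        | cons a l => simp only [List.length_cons]; omega
      have hrlt : r'.toNat < s.length := by
        have := hpre.length_le
        rw [List.length_drop] at this
        omega
      have step : findAllLoop s sub fuel (r' + 1) (acc ++ [r'])
          = (acc ++ [r']) ++ (occList s sub (r'.toNat + 1)).map (Nat.cast) := by
        have : r' + 1 = ((r'.toNat + 1 : Nat) : Int) := by omega
        rw [this]
        exact ih (r'.toNat + 1) (acc ++ [r']) (by omega) (by omega)
      rw [step]
      have hsplit : occList s sub k = r'.toNat :: occList s sub (r'.toNat + 1) := by
        unfold occList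
        have hr1 : List.range' k (s.length - k) =
            List.range' k (r'.toNat - k) ++ List.range' r'.toNat (s.length - r'.toNat) := by
          rw [show s.length - k = (r'.toNat - k) + (s.length - r'.toNat) from by omega,
            ← List.range'_append_1, show k + (r'.toNat - k) = r'.toNat from by omega]
        rw [hr1, List.filter_append]
        have h2 : List.filter (fun j => decide (sub <+: s.drop j)) (List.range' k (r'.toNat - k)) = [] := by
          refine List.filter_eq_nil_iff.2 ?_
          intro j hj hjp
          rw [decide_eq_true_eq] at hjp
          have hj' := List.mem_range'_1.1 hj
          exact hmin j hj'.1 (by omega) hjp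
        rw [h2, List.nil_append]
        have h3 : List.range' r'.toNat (s.length - r'.toNat) =
            r'.toNat :: List.range' (r'.toNat + 1) (s.length - (r'.toNat + 1)) := by
          have : s.length - r'.toNat = (s.length - (r'.toNat + 1)) + 1 := by omega
          rw [this, List.range'_succ]
        rw [h3, List.filter_cons, if_pos (by rw [decide_eq_true_eq]; exact hpre)]
      rw [hsplit]
      simp [hrcast.symm]

theorem findAllIndices_eq (s sub : List Char) (hs : sub ≠ []) :
    findAllIndices s sub = (occList s sub 0).map (Nat.cast) := by
  unfold findAllIndices
  have := findAllLoop_eq s sub hs (s.length + 2) 0 [] (by omega) (by omega)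
  simpa using this

theorem mem_occList_zero {p sub : List Char} (hs : sub ≠ []) {c : Nat} :
    c ∈ occList p sub 0 ↔ sub <+: p.drop c := by
  unfold occList
  rw [List.mem_filter]
  constructor
  · rintro ⟨-, h⟩; exact of_decide_eq_true h
  · intro h
    refine ⟨List.mem_range'_1.2 ⟨Nat.zero_le _, ?_⟩, decide_eq_true h⟩
    have hl := h.length_le
    rw [List.length_drop] at hl
    have : 1 ≤ sub.length := by
      cases sub with
      | nil => exact absurd rfl hs
      | cons a l => simp only [List.length_cons]; omega
    omega

theorem nodup_occList (p sub : List Char) (k : Nat) : (occList p sub k).Nodup :=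
  (List.nodup_range' _).filter _

theorem stepGraph_getD (p : List Char) (t : String) (ht : t.toList ≠ [])
    (d : PySem.Dict Int (List Int)) (c : Nat) :
    ((findAllIndices p t.toList).foldl
      (fun g idx => g.modify idx [] (· ++ [idx + (t.toList.length : Int)])) d).getD (c : Int) []
    = d.getD (c : Int) []
      ++ (if t.toList <+: p.drop c then [((c + t.toList.length : Nat) : Int)] else []) := by
  rw [findAllIndices_eq p t.toList ht]
  have hfold :
      ((occList p t.toList 0).map (Nat.cast)).foldl
        (fun g idx => g.modify idx [] (· ++ [idx + (t.toList.length : Int)])) d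
      = ((occList p t.toList 0).map (fun (j : Nat) => ((j : Int), (j : Int) + (t.toList.length : Int)))).foldl
        (fun g pr => g.modify pr.1 [] (· ++ [pr.2])) d := by
    rw [List.foldl_map, List.foldl_map]
  rw [hfold, PySem.Dict.getD_foldl_modify_append]
  congr 1
  rw [List.filter_map]
  have hpred : ∀ j ∈ occList p t.toList 0,
      (((fun pr => pr.1 == (c : Int)) ∘ fun (j : Nat) => ((j : Int), (j : Int) + (t.toList.length : Int))) j)
      = (j == c) := by
    intro j _
    simp [Function.comp, Nat.cast_inj]
  rw [List.filter_congr hpred, List.filter_beq]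
  by_cases hc : c ∈ occList p t.toList 0
  · rw [List.count_eq_one_of_mem (nodup_occList p t.toList 0) hc,
      if_pos ((mem_occList_zero ht).1 hc)]
    simp
  · rw [List.count_eq_zero_of_not_mem hc, if_neg (fun hpre => hc ((mem_occList_zero ht).2 hpre))]
    simp

theorem getGraph_getD_gen (p : List Char) (c : Nat) :
    ∀ (towels : List String) (d : PySem.Dict Int (List Int)), NoEmpty towels →
    (towels.foldl (fun g t =>
        (findAllIndices p t.toList).foldl
          (fun g idx => g.modify idx [] (· ++ [idx + (t.toList.length : Int)])) g) d).getD (c : Int) []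
      = d.getD (c : Int) [] ++ (natNbrs p towels c).map (Nat.cast) := by
  intro towels
  induction towels with
  | nil => intro d _; simp [natNbrs]
  | cons t ts ih =>
    intro d hT
    rw [List.foldl_cons, ih _ (fun x hx => hT x (by simp [hx])),
      stepGraph_getD p t (hT t (by simp)) d c]
    unfold natNbrs
    rw [List.flatMap_cons, List.map_append, List.append_assoc]
    congr 2
    split <;> simp

theorem getGraph_getD (p : List Char) (towels : List String) (hT : NoEmpty towels) (c : Nat) :
    (getGraph p towels).getD (c : Int) [] = (natNbrs p towels c).map (Nat.cast) := by
  unfold getGraph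
  rw [getGraph_getD_gen p c towels PySem.Dict.empty hT]
  simp [PySem.Dict.getD_empty]

theorem natNbrs_le (p : List Char) (towels : List String) (hT : NoEmpty towels) {c m : Nat}
    (h : m ∈ natNbrs p towels c) : c < m ∧ m ≤ p.length := by
  unfold natNbrs at h
  rw [List.mem_flatMap] at h
  obtain ⟨t, ht, hm⟩ := h
  by_cases hp : t.toList <+: p.drop c
  · rw [if_pos hp] at hm
    simp only [List.mem_singleton] at hm
    subst hm
    have h1 : 1 ≤ t.toList.length := by
      have := hT t ht
      cases hl : t.toList with
      | nil => exact absurd hl this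
      | cons a l => simp only [List.length_cons]; omega
    have hl := hp.length_le
    rw [List.length_drop] at hl
    constructor
    · omega
    · -- from the prefix: c < p.length (drop c nonempty) hence c + |t| ≤ p.length
      by_cases hcl : c ≤ p.length
      · omega
      · exfalso
        have : p.drop c = [] := List.drop_eq_nil_of_le (by omega)
        rw [this, List.prefix_nil] at hp
        exact (hT t ht) hp
  · rw [if_neg hp] at hm; simp at hm

theorem sum_map_natNbrs (p : List Char) (c : Nat) (g : Nat → Int) :
    ∀ towels : List String, ((natNbrs p towels c).map g).sum
      = (towels.map (fun t => if t.toList <+: p.drop c then g (c + t.toList.length) else 0)).sum := by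
  intro towels
  induction towels with
  | nil => simp [natNbrs]
  | cons t ts ih =>
    unfold natNbrs at *
    rw [List.flatMap_cons, List.map_append, List.sum_append, ih, List.map_cons, List.sum_cons]
    congr 1
    split <;> simp

theorem W_step (towels : List String) (p : List Char) (hT : NoEmpty towels)
    {i : Nat} (hi : i ≤ p.length) (hne : i ≠ p.length) :
    W towels p (p.length + 1) i
      = (towels.map (fun t =>
          if t.toList <+: p.drop i then W towels p (p.length + 1) (i + t.toList.length) else 0)).sum := by
  show W towels p (p.length + 1) i = _
  unfold W
  rw [if_neg hne]
  refine congrArg List.sum (List.map_congr_left ?_)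
  intro t ht
  split
  · rename_i hp
    have h1 := towel_len_pos hT ht
    have h2 := prefix_drop_le hp hi
    exact W_stab towels p hT p.length (p.length + 1) (i + t.toList.length) h2 (by omega) (by omega)
  · rfl

theorem W_unfold_nbrs (towels : List String) (p : List Char) (hT : NoEmpty towels)
    {i : Nat} (hi : i ≤ p.length) (hne : i ≠ p.length) :
    W towels p (p.length + 1) i
      = ((natNbrs p towels i).map (fun m => W towels p (p.length + 1) m)).sum := by
  rw [sum_map_natNbrs]
  exact W_step towels p hT hi hne

theorem gnap_eq (towels : List String) (p : List Char) (hT : NoEmpty towels) :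
    ∀ fuel (i : Nat) vis, i ≤ p.length → p.length - i < fuel →
      (∀ k v, vis.get? k = some v → ∃ m : Nat, k = (m : Int) ∧ m ≤ p.length ∧ v = W towels p (p.length + 1) m) →
      ∃ vis', gnap (getGraph p towels) p.length fuel (i : Int) vis = (W towels p (p.length + 1) i, vis') ∧
        (∀ k v, vis'.get? k = some v → ∃ m : Nat, k = (m : Int) ∧ m ≤ p.length ∧ v = W towels p (p.length + 1) m) := by
  intro fuel
  induction fuel with
  | zero => intro i vis _ h; omega
  | succ fuel ih =>
    intro i vis hi hfuel hgood
    simp only [gnap]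
    cases hvg : vis.get? (i : Int) with
    | some v =>
      obtain ⟨m, hm, _, hv⟩ := hgood _ _ hvg
      have : m = i := by exact_mod_cast hm.symm
      subst this
      exact ⟨vis, by rw [hv], hgood⟩
    | none =>
      by_cases hieq : i = p.length
      · subst hieq
        refine ⟨vis, ?_, hgood⟩
        rw [if_pos rfl]
        show ((1 : Int), vis) = _
        have : W towels p (p.length + 1) p.length = 1 := by
          unfold W; rw [if_pos rfl]
        rw [this]
      · have hilt : i < p.length := by omega
        rw [if_neg (by exact_mod_cast fun h => hieq (Nat.cast_injective h)),
          if_neg (by exact_mod_cast (by omega : ¬ (p.length < i)))]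
        rw [getGraph_getD p towels hT i, List.foldl_map]
        -- the inner fold over the neighbour list
        have hfold : ∀ (ms : List Nat) (acc : Int) (vis : PySem.Dict Int Int),
            (∀ m ∈ ms, i < m ∧ m ≤ p.length) →
            (∀ k v, vis.get? k = some v → ∃ m : Nat, k = (m : Int) ∧ m ≤ p.length ∧ v = W towels p (p.length + 1) m) →
            ∃ vis', ms.foldl
              (fun (st : Int × PySem.Dict Int Int) (m : Nat) =>
                let res := gnap (getGraph p towels) p.length fuel (m : Int) st.2
                (st.1 + res.1, res.2)) (acc, vis)
              = (acc + (ms.map (fun m => W towels p (p.length + 1) m)).sum, vis') ∧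
              (∀ k v, vis'.get? k = some v → ∃ m : Nat, k = (m : Int) ∧ m ≤ p.length ∧ v = W towels p (p.length + 1) m) := by
          intro ms
          induction ms with
          | nil => intro acc vis _ hg; exact ⟨vis, by simp, hg⟩
          | cons m ms ihm =>
            intro acc vis hbound hg
            obtain ⟨hml, hmu⟩ := hbound m (by simp)
            obtain ⟨vis₁, heq₁, hg₁⟩ := ih m vis hmu (by omega) hg
            obtain ⟨vis', heq', hg'⟩ := ihm (acc + W towels p (p.length + 1) m) vis₁
              (fun x hx => hbound x (by simp [hx])) hg₁
            refine ⟨vis', ?_, hg'⟩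
            rw [List.foldl_cons]
            show List.foldl _ (acc + (gnap (getGraph p towels) p.length fuel (m : Int) vis).1,
              (gnap (getGraph p towels) p.length fuel (m : Int) vis).2) ms = _
            rw [heq₁, heq', List.map_cons, List.sum_cons]
            ring_nf
        obtain ⟨vis', heq', hg'⟩ := hfold (natNbrs p towels i) 0 vis
          (fun m hm => natNbrs_le p towels hT hm) hgood
        refine ⟨vis'.insert (i : Int) (W towels p (p.length + 1) i), ?_, ?_⟩
        · rw [heq']
          show ((0 : Int) + _, _) = _
          rw [zero_add, ← W_unfold_nbrs towels p hT hi hieq]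
        · intro k v hkv
          rw [PySem.Dict.get?_insert] at hkv
          split at hkv
          · rename_i hk
            exact ⟨i, hk, hi, (Option.some_inj.1 hkv).symm⟩
          · exact hg' k v hkv

-- BFS bookkeeping: how many nodes of 0..n are not yet visited
def cap (n : Nat) (visited : List Int) : Nat :=
  ((Finset.range (n + 1)).filter (fun (m : Nat) => ((m : Int)) ∉ visited)).card

theorem cap_mono (n : Nat) (v : List Int) (x : Int) : cap n (v ++ [x]) ≤ cap n v := by
  refine Finset.card_le_card ?_
  intro m hm
  rw [Finset.mem_filter] at *
  exact ⟨hm.1, fun h => hm.2 (List.mem_append_left _ h)⟩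

theorem cap_strict (n : Nat) {v : List Int} {m : Nat} (hm : m ≤ n) (hnm : ((m : Int)) ∉ v) :
    cap n (v ++ [((m : Int))]) < cap n v := by
  refine Finset.card_lt_card ⟨?_, ?_⟩
  · intro x hx
    rw [Finset.mem_filter] at *
    exact ⟨hx.1, fun h => hx.2 (List.mem_append_left _ h)⟩
  · intro hsub
    have hmem : m ∈ (Finset.range (n + 1)).filter (fun (m : Nat) => ((m : Int)) ∉ v) :=
      Finset.mem_filter.2 ⟨Finset.mem_range.2 (by omega), hnm⟩
    have := Finset.mem_filter.1 (hsub hmem)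
    exact this.2 (List.mem_append_right _ (by simp))

def Rq (towels : List String) (p : List Char) (queue : List (Int × List Int)) : Prop :=
  ∃ e ∈ queue, ∃ m : Nat, e.1 = (m : Int) ∧ Reach towels p m

def BfsInv (towels : List String) (p : List Char)
    (queue : List (Int × List Int)) (visited : List Int) : Prop :=
  (∀ v ∈ visited, ∃ m : Nat, v = (m : Int) ∧ m ≤ p.length) ∧
  (∀ e ∈ queue, ∃ m : Nat, e.1 = (m : Int) ∧ m ≤ p.length) ∧
  (∀ v ∈ visited, v ∈ queue.map Prod.fst ∨
    (v ≠ ((p.length : Nat) : Int) ∧ ∀ w ∈ (getGraph p towels).getD v [], w ∈ visited))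

theorem mem_natNbrs_step {towels : List String} {p : List Char} {c m : Nat}
    (h : m ∈ natNbrs p towels c) (hr : Reach towels p m) : Reach towels p c := by
  unfold natNbrs at h
  rw [List.mem_flatMap] at h
  obtain ⟨t, ht, hm⟩ := h
  by_cases hp : t.toList <+: p.drop c
  · rw [if_pos hp] at hm
    simp only [List.mem_singleton] at hm
    subst hm
    exact Reach.step ht hp hr
  · rw [if_neg hp] at hm; simp at hm

theorem reach_nbr {towels : List String} {p : List Char} {m : Nat}
    (hr : Reach towels p m) (hne : m ≠ p.length) :
    ∃ m' ∈ natNbrs p towels m, Reach towels p m' := by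
  cases hr with
  | done => exact absurd rfl hne
  | step ht hp h =>
    rename_i t
    refine ⟨m + t.toList.length, ?_, h⟩
    unfold natNbrs
    rw [List.mem_flatMap]
    exact ⟨t, ht, by rw [if_pos hp]; simp⟩

-- descent: a reachable visited node leads (through expanded nodes) to a reachable queued node
theorem descent (towels : List String) (p : List Char) (hT : NoEmpty towels)
    (queue : List (Int × List Int)) (visited : List Int)
    (hinv3 : ∀ v ∈ visited, v ∈ queue.map Prod.fst ∨
      (v ≠ ((p.length : Nat) : Int) ∧ ∀ w ∈ (getGraph p towels).getD v [], w ∈ visited)) :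
    ∀ d (m : Nat), p.length - m ≤ d → m ≤ p.length → Reach towels p m →
      ((m : Int)) ∈ visited → Rq towels p queue := by
  intro d
  induction d with
  | zero =>
    intro m hd hm hr hv
    have : m = p.length := by omega
    subst this
    rcases hinv3 _ hv with hq | ⟨hne, _⟩
    · obtain ⟨e, he, hfst⟩ := List.mem_map.1 hq
      exact ⟨e, he, p.length, hfst, hr⟩
    · exact absurd rfl hne
  | succ d ihd =>
    intro m hd hm hr hv
    rcases hinv3 _ hv with hq | ⟨hne, hclosed⟩
    · obtain ⟨e, he, hfst⟩ := List.mem_map.1 hq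
      exact ⟨e, he, m, hfst, hr⟩
    · have hmne : m ≠ p.length := fun h => hne (by rw [h])
      obtain ⟨m', hm', hr'⟩ := reach_nbr hr hmne
      obtain ⟨hlt, hle⟩ := natNbrs_le p towels hT hm'
      have hv' : ((m' : Int)) ∈ visited := by
        refine hclosed _ ?_
        rw [getGraph_getD p towels hT m]
        exact List.mem_map.2 ⟨m', hm', rfl⟩
      exact ihd m' (by omega) hle hr' hv'

-- the neighbour-expansion fold of one BFS iteration
theorem foldExp (n : Nat) (path : List Int) :
    ∀ (ms : List Nat) (q : List (Int × List Int)) (v : List Int), (∀ m ∈ ms, m ≤ n) →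
    ∃ q' v' news ext,
      ms.foldl (fun (st : List (Int × List Int) × List Int) (m : Nat) =>
        if ((m : Int)) ∈ st.2 then st
        else (st.1 ++ [(((m : Int)), path ++ [((m : Int))])], st.2 ++ [((m : Int))])) (q, v)
        = (q', v') ∧
      q' = q ++ news ∧ v' = v ++ ext ∧
      (∀ e ∈ news, ∃ m ∈ ms, e.1 = ((m : Int))) ∧
      (∀ x ∈ ext, ∃ m ∈ ms, x = ((m : Int))) ∧
      (∀ x ∈ ext, x ∈ news.map Prod.fst) ∧
      (∀ m ∈ ms, ((m : Int)) ∈ v') ∧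
      q'.length + cap n v' ≤ q.length + cap n v := by
  intro ms
  induction ms with
  | nil =>
    intro q v _
    exact ⟨q, v, [], [], rfl, by simp, by simp, by simp, by simp, by simp, by simp, le_refl _⟩
  | cons m ms ih =>
    intro q v hb
    by_cases hmem : ((m : Int)) ∈ v
    · obtain ⟨q', v', news, ext, heq, hq, hv, hnews, hext, hextq, hall, hcap⟩ :=
        ih q v (fun x hx => hb x (by simp [hx]))
      refine ⟨q', v', news, ext, ?_, hq, hv, ?_, ?_, hextq, ?_, hcap⟩
      · rw [List.foldl_cons, if_pos hmem]; exact heq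
      · exact fun e he => (hnews e he).imp (fun m' h => ⟨by simp [h.1], h.2⟩)
      · exact fun x hx => (hext x hx).imp (fun m' h => ⟨by simp [h.1], h.2⟩)
      · intro m' hm'
        rcases List.mem_cons.1 hm' with h | h
        · subst h; rw [hv]; exact List.mem_append_left _ hmem
        · exact hall m' h
    · obtain ⟨q', v', news, ext, heq, hq, hv, hnews, hext, hextq, hall, hcap⟩ :=
        ih (q ++ [(((m : Int)), path ++ [((m : Int))])]) (v ++ [((m : Int))])
          (fun x hx => hb x (by simp [hx]))
      refine ⟨q', v', (((m : Int)), path ++ [((m : Int))]) :: news, ((m : Int)) :: ext,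
        ?_, ?_, ?_, ?_, ?_, ?_, ?_, ?_⟩
      · rw [List.foldl_cons, if_neg hmem]; exact heq
      · rw [hq, List.append_assoc]; rfl
      · rw [hv, List.append_assoc]; rfl
      · intro e he
        rcases List.mem_cons.1 he with h | h
        · subst h; exact ⟨m, by simp⟩
        · exact (hnews e h).imp (fun m' h' => ⟨by simp [h'.1], h'.2⟩)
      · intro x hx
        rcases List.mem_cons.1 hx with h | h
        · subst h; exact ⟨m, by simp⟩
        · exact (hext x h).imp (fun m' h' => ⟨by simp [h'.1], h'.2⟩)
      · intro x hx
        rcases List.mem_cons.1 hx with h | h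
        · subst h; simp
        · simp only [List.map_cons, List.mem_cons]
          exact Or.inr (hextq x h)
      · intro m' hm'
        rcases List.mem_cons.1 hm' with h | h
        · subst h; rw [hv]
          exact List.mem_append_left _ (List.mem_append_right _ (by simp))
        · exact hall m' h
      · have hstrict := cap_strict n (hb m (by simp)) hmem
        have : q'.length + cap n v' ≤ q.length + 1 + cap n (v ++ [((m : Int))]) := by
          simpa using hcap
        omega

theorem dfsLoop_spec (towels : List String) (p : List Char) (hT : NoEmpty towels) :
    ∀ fuel (queue : List (Int × List Int)) (visited : List Int),
      BfsInv towels p queue visited → queue.length + cap p.length visited < fuel →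
      ∃ out, dfsLoop (getGraph p towels) [((p.length : Nat) : Int)] fuel queue visited = out ∧
        (out = [] ∨ ∃ e, out = [e]) ∧ (out ≠ [] ↔ Rq towels p queue) := by
  intro fuel
  induction fuel with
  | zero => intro queue visited _ h; omega
  | succ fuel ih =>
    intro queue visited hinv hfuel
    obtain ⟨hinv1, hinv2, hinv3⟩ := hinv
    cases queue with
    | nil =>
      refine ⟨[], rfl, Or.inl rfl, ?_⟩
      constructor
      · intro h; exact absurd rfl h
      · rintro ⟨e, he, -⟩; exact absurd he (List.not_mem_nil)
    | cons hd rest =>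
      obtain ⟨node, path⟩ := hd
      obtain ⟨m₀, hm₀, hm₀le⟩ := hinv2 (node, path) (by simp)
      simp only at hm₀
      subst hm₀
      by_cases hgoal : ((m₀ : Int)) ∈ [((p.length : Nat) : Int)]
      · have hm₀n : m₀ = p.length := by
          simp only [List.mem_singleton] at hgoal
          exact_mod_cast hgoal
        subst hm₀n
        refine ⟨[(((p.length : Nat) : Int), path)], ?_, Or.inr ⟨_, rfl⟩, ?_⟩
        · show dfsLoop _ _ (fuel + 1) _ _ = _
          simp only [dfsLoop]
          rw [if_pos hgoal]
        · constructor
          · intro _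
            exact ⟨(((p.length : Nat) : Int), path), by simp, p.length, rfl, Reach.done⟩
          · intro _ h; simp at h
      · have hm₀ne : m₀ ≠ p.length := fun h => hgoal (by rw [h]; simp)
        have hgetd : (getGraph p towels).getD ((m₀ : Int)) [] = (natNbrs p towels m₀).map Nat.cast :=
          getGraph_getD p towels hT m₀
        obtain ⟨q', v', news, ext, heqfold, hq, hv, hnews, hext, hextq, hall, hcap⟩ :=
          foldExp p.length path (natNbrs p towels m₀) rest (visited ++ [((m₀ : Int))])
            (fun m hm => (natNbrs_le p towels hT hm).2)
        have hinv1' : ∀ v ∈ v', ∃ m : Nat, v = (m : Int) ∧ m ≤ p.length := by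
          intro x hx
          rw [hv] at hx
          rcases List.mem_append.1 hx with hx | hx
          · rcases List.mem_append.1 hx with hx | hx
            · exact hinv1 x hx
            · simp only [List.mem_singleton] at hx; exact ⟨m₀, hx, hm₀le⟩
          · obtain ⟨m, hm, rfl⟩ := hext x hx
            exact ⟨m, rfl, (natNbrs_le p towels hT hm).2⟩
        have hinv2' : ∀ e ∈ q', ∃ m : Nat, e.1 = (m : Int) ∧ m ≤ p.length := by
          intro e he
          rw [hq] at he
          rcases List.mem_append.1 he with he | he
          · exact hinv2 e (by simp [he])
          · obtain ⟨m, hm, hfst⟩ := hnews e he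
            exact ⟨m, hfst, (natNbrs_le p towels hT hm).2⟩
        have hinv3' : ∀ x ∈ v', x ∈ q'.map Prod.fst ∨
            (x ≠ ((p.length : Nat) : Int) ∧ ∀ w ∈ (getGraph p towels).getD x [], w ∈ v') := by
          intro x hx
          rw [hv] at hx
          rcases List.mem_append.1 hx with hx | hx
          · rcases List.mem_append.1 hx with hx | hx
            · rcases hinv3 x hx with hxq | ⟨hxe, hxc⟩
              · simp only [List.map_cons, List.mem_cons] at hxq
                rcases hxq with hxq | hxq
                · -- x is the popped node m₀: now expanded and closed
                  right
                  refine ⟨by rw [hxq]; exact_mod_cast fun h => hm₀ne (Nat.cast_injective h), ?_⟩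
                  intro w hw
                  rw [hxq, hgetd] at hw
                  obtain ⟨m, hm, rfl⟩ := List.mem_map.1 hw
                  exact hall m hm
                · left
                  rw [hq, List.map_append]
                  exact List.mem_append_left _ hxq
              · right
                refine ⟨hxe, fun w hw => ?_⟩
                rw [hv]
                exact List.mem_append_left _ (List.mem_append_left _ (hxc w hw))
            · -- x = ↑m₀
              simp only [List.mem_singleton] at hx
              subst hx
              right
              refine ⟨by exact_mod_cast fun h => hm₀ne (Nat.cast_injective h), ?_⟩
              intro w hw
              rw [hgetd] at hw
              obtain ⟨m, hm, rfl⟩ := List.mem_map.1 hw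
              exact hall m hm
          · left
            rw [hq, List.map_append]
            exact List.mem_append_right _ (hextq x hx)
        have hfuel' : q'.length + cap p.length v' < fuel := by
          have h1 : cap p.length (visited ++ [((m₀ : Int))]) ≤ cap p.length visited :=
            cap_mono _ _ _
          simp only [List.length_cons] at hfuel
          omega
        obtain ⟨out, heq, hshape, hiff⟩ := ih q' v' ⟨hinv1', hinv2', hinv3'⟩ hfuel'
        refine ⟨out, ?_, hshape, ?_⟩
        · show dfsLoop _ _ (fuel + 1) _ _ = _
          simp only [dfsLoop]
          rw [if_neg hgoal]
          show dfsLoop _ _ fuel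
            (((getGraph p towels).getD ((m₀ : Int)) []).foldl _ (rest, visited ++ [((m₀ : Int))])).1
            (((getGraph p towels).getD ((m₀ : Int)) []).foldl _ (rest, visited ++ [((m₀ : Int))])).2 = _
          rw [hgetd, List.foldl_map, heqfold]
          exact heq
        · rw [hiff]
          constructor
          · -- Rq q' → Rq ((node,path)::rest)
            rintro ⟨e, he, m, hfst, hr⟩
            rw [hq] at he
            rcases List.mem_append.1 he with he | he
            · exact ⟨e, by simp [he], m, hfst, hr⟩
            · obtain ⟨m', hm', hfst'⟩ := hnews e he
              have : m' = m := by
                have := hfst'.symm.trans hfst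
                exact_mod_cast this
              subst this
              exact ⟨(((m₀ : Int)), path), by simp, m₀, rfl, mem_natNbrs_step hm' hr⟩
          · -- Rq ((node,path)::rest) → Rq q'
            rintro ⟨e, he, m, hfst, hr⟩
            rcases List.mem_cons.1 he with he | he
            · -- the popped node reaches the goal
              subst he
              simp only at hfst
              have hmm : m = m₀ := by exact_mod_cast hfst.symm
              subst hmm
              obtain ⟨m', hm', hr'⟩ := reach_nbr hr hm₀ne
              have hv'm : ((m' : Int)) ∈ v' := hall m' hm'
              exact descent towels p hT q' v' hinv3' (p.length - m')
                m' (le_refl _) (natNbrs_le p towels hT hm').2 hr' hv'm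
            · exact ⟨e, by rw [hq]; exact List.mem_append_left _ he, m, hfst, hr⟩

theorem cap_nil (n : Nat) : cap n [] = n + 1 := by
  unfold cap
  rw [Finset.filter_true_of_mem (by intro x _; exact List.not_mem_nil)]
  simp

theorem dfs_len (towels : List String) (p : List Char) (hT : NoEmpty towels) :
    (dfsLoop (getGraph p towels) [(p.length : Int)] (p.length + 3) [((0 : Int), [(0 : Int)])] []).length
    = if 0 < W towels p (p.length + 1) 0 then 1 else 0 := by
  have hinv : BfsInv towels p [((0 : Int), [(0 : Int)])] [] := by
    refine ⟨fun v hv => absurd hv (List.not_mem_nil), ?_, fun v hv => absurd hv (List.not_mem_nil)⟩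
    intro e he
    simp only [List.mem_singleton] at he
    subst he
    exact ⟨0, by simp, Nat.zero_le _⟩
  have hfuel : ([((0 : Int), [(0 : Int)])] : List (Int × List Int)).length + cap p.length [] < p.length + 3 := by
    rw [cap_nil]; simp only [List.length_cons, List.length_nil]; omega
  obtain ⟨out, heq, hshape, hiff⟩ := dfsLoop_spec towels p hT (p.length + 3) _ _ hinv hfuel
  have hrq : Rq towels p [((0 : Int), [(0 : Int)])] ↔ 0 < W towels p (p.length + 1) 0 := by
    rw [W_pos_iff towels p hT (p.length + 1) 0 (Nat.zero_le _) (by omega)]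
    constructor
    · rintro ⟨e, he, m, hfst, hr⟩
      simp only [List.mem_singleton] at he
      subst he
      simp only at hfst
      have : m = 0 := by exact_mod_cast hfst.symm
      subst this
      exact hr
    · intro hr
      exact ⟨((0 : Int), [(0 : Int)]), by simp, 0, by simp, hr⟩
  rw [heq]
  by_cases hw : 0 < W towels p (p.length + 1) 0
  · rw [if_pos hw]
    have : out ≠ [] := hiff.2 (hrq.2 hw)
    rcases hshape with h | ⟨e, he⟩
    · exact absurd h this
    · rw [he]; rfl
  · rw [if_neg hw]
    have : out = [] := by
      by_contra hne
      exact hw (hrq.1 (hiff.1 hne))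
    rw [this]; rfl

theorem W_at_len (towels : List String) (p : List Char) :
    W towels p (p.length + 1) p.length = 1 := by
  unfold W; rw [if_pos rfl]

theorem sum_filter_map_eq_sum_ite (l : List String) (q : String → Bool) (f : String → Int) :
    ((l.filter q).map f).sum = (l.map (fun t => if q t then f t else 0)).sum := by
  induction l with
  | nil => rfl
  | cons a l ih =>
    by_cases h : q a = true
    · simp [h, ih]
    · simp [h, ih]

set_option maxHeartbeats 1000000 in
theorem dp_fold (towels : List String) (p : List Char) (hT : NoEmpty towels) :
    ∀ (j : Nat) (dp : List Int), j ≤ p.length → dp.length = p.length + 1 →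
      (∀ k : Nat, k ≤ p.length →
        PySem.List.pyGetD dp (k : Int) 0 = if j ≤ k then W towels p (p.length + 1) k else 0) →
      ∀ k : Nat, k ≤ p.length →
        PySem.List.pyGetD
          ((PySem.List.pyRange ((j : Int) - 1) (-1) (-1)).foldl
            (fun dp i =>
              PySem.List.pySetD dp i
                (((towels.filter (fun t =>
                    PySem.List.slice p (some i) (some (i + (t.toList.length : Int))) == t.toList)).map
                  (fun t => PySem.List.pyGetD dp (i + (t.toList.length : Int)) 0)).sum))
            dp) (k : Int) 0
        = W towels p (p.length + 1) k := by
  intro j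
  induction j with
  | zero =>
    intro dp _ _ hdp k hk
    rw [show ((0 : Nat) : Int) - 1 = -1 from by norm_num,
      PySem.List.pyRange_neg_one_eq_nil (le_refl _), List.foldl_nil, hdp k hk,
      if_pos (Nat.zero_le _)]
  | succ j ih =>
    intro dp hj hlen hdp k hk
    have hcons : PySem.List.pyRange (((j + 1 : Nat) : Int) - 1) (-1) (-1)
        = ((j : Nat) : Int) :: PySem.List.pyRange ((j : Int) - 1) (-1) (-1) := by
      rw [show ((j + 1 : Nat) : Int) - 1 = ((j : Nat) : Int) from by push_cast; ring]
      exact PySem.List.pyRange_neg_one_cons (by omega)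
    rw [hcons, List.foldl_cons]
    -- the value written at index j is W (n+1) j
    have hS : ((towels.filter (fun t =>
          PySem.List.slice p (some ((j : Nat) : Int)) (some (((j : Nat) : Int) + (t.toList.length : Int))) == t.toList)).map
        (fun t => PySem.List.pyGetD dp (((j : Nat) : Int) + (t.toList.length : Int)) 0)).sum
        = W towels p (p.length + 1) j := by
      have hcond : ∀ t : String,
          (PySem.List.slice p (some ((j : Nat) : Int)) (some (((j : Nat) : Int) + (t.toList.length : Int))) == t.toList)
          = decide (t.toList <+: p.drop j) := by
        intro t
        rw [show ((j : Nat) : Int) + (t.toList.length : Int) = ((j + t.toList.length : Nat) : Int) from by push_cast; ring,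
          PySem.List.slice_natCast]
        have : j + t.toList.length - j = t.toList.length := by omega
        rw [this]
        rcases Decidable.em (t.toList <+: p.drop j) with hp | hp
        · rw [decide_eq_true hp]
          exact beq_iff_eq.2 (List.prefix_iff_eq_take.1 hp).symm
        · rw [decide_eq_false hp]
          refine beq_eq_false_iff_ne.2 (fun hc => hp ?_)
          exact List.prefix_iff_eq_take.2 hc.symm
      have hfilter : (towels.filter (fun t =>
            PySem.List.slice p (some ((j : Nat) : Int)) (some (((j : Nat) : Int) + (t.toList.length : Int))) == t.toList))
          = towels.filter (fun t => decide (t.toList <+: p.drop j)) :=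
        List.filter_congr (fun t _ => hcond t)
      rw [hfilter, sum_filter_map_eq_sum_ite,
        W_step towels p hT (by omega) (by omega)]
      refine congrArg List.sum (List.map_congr_left ?_)
      intro t ht
      rcases Decidable.em (t.toList <+: p.drop j) with hp | hp
      · rw [if_pos (decide_eq_true hp), if_pos hp]
        have h1 := towel_len_pos hT ht
        have h2 := prefix_drop_le hp (by omega)
        rw [show ((j : Nat) : Int) + (t.toList.length : Int) = ((j + t.toList.length : Nat) : Int) from by push_cast; ring,
          hdp (j + t.toList.length) h2, if_pos (by omega)]
      · have hd : decide (t.toList <+: p.drop j) = false := decide_eq_false hp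
        rw [hd, if_neg hp]
        simp
    apply ih _ (by omega) ?_ ?_ k hk
    · rw [PySem.List.pySetD_natCast, List.length_set]; exact hlen
    · intro k' hk'
      rw [PySem.List.pyGetD_pySetD_natCast _ _ _ _ _ (by omega)]
      split
      · rename_i h
        have : k' = j := by exact_mod_cast h
        subst this
        rw [hS, if_pos (le_refl _)]
      · rename_i h
        have hne : k' ≠ j := fun hh => h (by rw [hh])
        rw [hdp k' hk']
        rcases Decidable.em (j + 1 ≤ k') with hle | hle
        · rw [if_pos hle, if_pos (by omega)]
        · rw [if_neg hle, if_neg (by omega)]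

theorem dp_eq (towels : List String) (p : List Char) (hT : NoEmpty towels) :
    PySem.List.pyGetD
      ((PySem.List.pyRange ((p.length : Int) - 1) (-1) (-1)).foldl
        (fun dp i =>
          PySem.List.pySetD dp i
            (((towels.filter (fun t =>
                PySem.List.slice p (some i) (some (i + (t.toList.length : Int))) == t.toList)).map
              (fun t => PySem.List.pyGetD dp (i + (t.toList.length : Int)) 0)).sum))
        (PySem.List.pySetD (List.replicate (p.length + 1) (0 : Int)) ((p.length : Int)) 1))
      (0 : Int) 0 = W towels p (p.length + 1) 0 := by
  have hmain := dp_fold towels p hT p.length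
    (PySem.List.pySetD (List.replicate (p.length + 1) (0 : Int)) ((p.length : Int)) 1)
    (le_refl _) ?_ ?_ 0 (Nat.zero_le _)
  · simpa using hmain
  · rw [PySem.List.pySetD_natCast, List.length_set, List.length_replicate]
  · intro k hk
    rw [PySem.List.pyGetD_pySetD_natCast _ _ _ _ _ (by rw [List.length_replicate]; omega)]
    split
    · rename_i h
      have : k = p.length := by exact_mod_cast h
      subst this
      rw [if_pos (le_refl _), W_at_len]
    · rename_i h
      have hkne : k ≠ p.length := fun hh => h (by rw [hh])
      rw [if_neg (by omega)]
      simp [List.getD_eq_getElem?_getD]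

-- ===== VERDICT (by name: the statement is the Claim_ definition above) =====
theorem solution_spec : Claim_equal_solution := by
  intro towels patterns _ hPre
  show solution towels patterns = solution_alt towels patterns
  unfold solution solution_alt
  apply PySem.List.foldl_congr_mem
  intro acc pattern hmem
  have hcase : "" ∉ towels ∨ pattern = "" := by
    unfold Pre_solution at hPre
    by_cases he : "" ∈ towels
    · right
      by_contra hne
      exact hPre ⟨he, pattern, hmem, hne⟩
    · exact Or.inl he
  rcases hcase with hne | hemp
  · -- all towels nonempty: the general theory applies
    have hT : NoEmpty towels := by
      intro t ht h
      exact hne (String.toList_eq_nil_iff.1 h ▸ ht)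
    simp only []
    rw [dfs_len towels pattern.toList hT]
    obtain ⟨vis', hg, -⟩ := gnap_eq towels pattern.toList hT (pattern.toList.length + 1) 0
      PySem.Dict.empty (Nat.zero_le _) (by omega)
      (by intro k v hkv; rw [PySem.Dict.get?_empty] at hkv; exact absurd hkv (by simp))
    simp only [Nat.cast_zero] at hg
    rw [hg, dp_eq towels pattern.toList hT]
    by_cases hw : 0 < W towels pattern.toList (pattern.toList.length + 1) 0
    · rw [if_pos hw, if_pos hw]; rfl
    · rw [if_neg hw, if_neg hw]; rfl
  · -- empty pattern: both sides add (1, 1) whatever the towels are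
    subst hemp
    simp only []
    have hp : ("" : String).toList = [] := rfl
    rw [hp]
    simp only [List.length_nil]
    have h1 : (dfsLoop (getGraph [] towels) [((0 : Nat) : Int)] (0 + 3)
        [((0 : Int), [(0 : Int)])] []).length = 1 := by
      simp only [dfsLoop]
      rw [if_pos (by simp)]
      rfl
    have h2 : (gnap (getGraph [] towels) 0 (0 + 1) 0 PySem.Dict.empty).1 = 1 := by
      simp only [gnap]
      rw [PySem.Dict.get?_empty]
      simp
    rw [h1, h2]
    have h3 : (PySem.List.pyRange (((0 : Nat) : Int) - 1) (-1) (-1)) = [] :=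
      PySem.List.pyRange_neg_one_eq_nil (by omega)
    have h4 : PySem.List.pyGetD
        (PySem.List.pySetD (List.replicate (0 + 1) (0 : Int)) ((0 : Nat) : Int) 1) (0 : Int) 0 = 1 := by
      decide
    simp only [h3, List.foldl_nil, h4]
    norm_num
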